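-- pv_equiv track=rewrite | github.com/youngeun10/baekjoon | 백준/Silver/20546. 🐜 기적의 매매법 🐜/🐜 기적의 매매법 🐜.py | TIMING
-- ===== SOURCE A (Python) =====
-- def TIMING(s, d):
--     c = 0
--     chk = [0, ]
--     for i in range(1, len(d)):
--         if d[i-1] > d[i]:
--             chk.append(-1)
--         elif d[i-1] < d[i]:
--             chk.append(1)
--         else:
--             chk.append(0)
--
--         if i > 2:
--             if sum(chk[i-2:i+1]) == 3:
--                 s += c * d[i]
--                 c = 0
--             elif sum(chk[i-2:i+1]) == -3:
--                 c += s // d[i]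
--                 s = s % d[i]
--     return c * d[-1] + s
-- ===== SOURCE B (Python) =====
-- def TIMING(s, d):
--     c = 0
--     up = 0
--     down = 0
--     for i in range(1, len(d)):
--         if d[i-1] < d[i]:
--             up += 1
--             down = 0
--         elif d[i-1] > d[i]:
--             down += 1
--             up = 0
--         else:
--             up = 0
--             down = 0
--         if up >= 3:
--             s += c * d[i]
--             c = 0
--         elif down >= 3:
--             c += s // d[i]
--             s = s % d[i]
--     return c * d[-1] + s
-- ===== Notes on version B (the rewrite author's own statement) =====
-- stated objective: faster
-- what changed: Drops the materialized chk list and the repeated sum(chk[i-2:i+1]) window sums, maintaining instead two running streak counters (consecutive rises / falls) reset on a direction change.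
import Mathlib
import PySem

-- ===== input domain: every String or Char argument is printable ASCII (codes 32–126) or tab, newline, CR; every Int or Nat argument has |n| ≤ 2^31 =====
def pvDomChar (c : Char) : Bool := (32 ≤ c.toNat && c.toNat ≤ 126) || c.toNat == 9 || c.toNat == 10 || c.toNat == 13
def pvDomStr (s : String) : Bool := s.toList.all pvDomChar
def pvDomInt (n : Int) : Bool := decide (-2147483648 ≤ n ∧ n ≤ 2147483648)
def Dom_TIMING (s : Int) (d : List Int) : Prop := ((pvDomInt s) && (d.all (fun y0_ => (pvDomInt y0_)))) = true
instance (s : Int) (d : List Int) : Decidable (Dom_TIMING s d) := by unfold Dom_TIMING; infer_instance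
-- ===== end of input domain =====

-- B replaces the chk list and its sum(chk[i-2:i+1]) window checks by two running streak counters (simpler, no list).
-- ===== PORT A =====
-- one loop iteration of A: state (s, c, chk)
def pvStepA (d : List Int) (st : Int × Int × List Int) (i : Int) : Int × Int × List Int :=
  let s := st.1
  let c := st.2.1
  let chk :=
    if PySem.List.pyGetD d (i-1) 0 > PySem.List.pyGetD d i 0 then st.2.2 ++ [(-1 : Int)]
    else if PySem.List.pyGetD d (i-1) 0 < PySem.List.pyGetD d i 0 then st.2.2 ++ [(1 : Int)]
    else st.2.2 ++ [(0 : Int)]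
  if 2 < i then
    if (PySem.List.slice chk (some (i-2)) (some (i+1))).sum = 3 then
      (s + c * PySem.List.pyGetD d i 0, 0, chk)
    else if (PySem.List.slice chk (some (i-2)) (some (i+1))).sum = -3 then
      (PySem.Int.mod s (PySem.List.pyGetD d i 0),
       c + PySem.Int.floordiv s (PySem.List.pyGetD d i 0), chk)
    else (s, c, chk)
  else (s, c, chk)

def TIMING (s : Int) (d : List Int) : Int :=
  let r := (PySem.List.pyRange 1 (PySem.List.len d) 1).foldl (pvStepA d) (s, 0, [(0 : Int)])
  r.2.1 * PySem.List.pyGetD d (-1) 0 + r.1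

-- ===== PORT B =====
-- one loop iteration of B: state (s, c, up, down)
def pvStepB (d : List Int) (st : Int × Int × Int × Int) (i : Int) : Int × Int × Int × Int :=
  let s := st.1
  let c := st.2.1
  let ud :=
    if PySem.List.pyGetD d (i-1) 0 < PySem.List.pyGetD d i 0 then (st.2.2.1 + 1, (0 : Int))
    else if PySem.List.pyGetD d (i-1) 0 > PySem.List.pyGetD d i 0 then ((0 : Int), st.2.2.2 + 1)
    else ((0 : Int), (0 : Int))
  if 3 ≤ ud.1 then (s + c * PySem.List.pyGetD d i 0, 0, ud.1, ud.2)
  else if 3 ≤ ud.2 then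
    (PySem.Int.mod s (PySem.List.pyGetD d i 0),
     c + PySem.Int.floordiv s (PySem.List.pyGetD d i 0), ud.1, ud.2)
  else (s, c, ud.1, ud.2)

def TIMING_alt (s : Int) (d : List Int) : Int :=
  let r := (PySem.List.pyRange 1 (PySem.List.len d) 1).foldl (pvStepB d) (s, 0, 0, 0)
  r.2.1 * PySem.List.pyGetD d (-1) 0 + r.1

-- ===== PRECONDITION & SPEC =====
-- Pre_ excludes exactly the inputs where Python A raises: the empty list (IndexError on d[-1]) and
-- lists with three consecutive strict falls ending in 0 (ZeroDivisionError on s // d[i]).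
def Pre_TIMING (s : Int) (d : List Int) : Prop :=
  d ≠ [] ∧ ∀ i ∈ List.range d.length, 3 ≤ i →
    ¬(d.getD (i-3) 0 > d.getD (i-2) 0 ∧ d.getD (i-2) 0 > d.getD (i-1) 0 ∧
      d.getD (i-1) 0 > d.getD i 0 ∧ d.getD i 0 = 0)
instance (s : Int) (d : List Int) : Decidable (Pre_TIMING s d) := by unfold Pre_TIMING; infer_instance

def pvWitness_TIMING : Int × List Int := (10, [3, 2, 1, 1, 5])

def Spec_TIMING (s : Int) (d : List Int) (out : Int) : Prop := out = TIMING_alt s d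
instance (s : Int) (d : List Int) (out : Int) : Decidable (Spec_TIMING s d out) := by unfold Spec_TIMING; infer_instance

-- ===== CLAIM (what is proved, stated in full; the proofs are below) =====
def Claim_equal_TIMING : Prop := ∀ (s : Int) (d : List Int), Dom_TIMING s d → Pre_TIMING s d → Spec_TIMING s d (TIMING s d)

-- ===== LEMMAS AND PROOFS =====

def pvTrail (l : List Int) (v : Int) : Int := ((l.reverse.takeWhile (fun x => x == v)).length : Int)

theorem pvTrail_append (l : List Int) (x v : Int) :
    pvTrail (l ++ [x]) v = if x = v then pvTrail l v + 1 else 0 := by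
  simp [pvTrail, List.takeWhile_cons]
  by_cases h : x = v <;> simp [h]

theorem pvLast3 (r : List Int) (m : Nat) (hlen : r.length = m + 3)
    (he : ∀ x ∈ r, x = -1 ∨ x = 0 ∨ x = 1) :
    (((r.drop m).take 3).sum = 3 ↔ 3 ≤ pvTrail r 1) ∧
    (((r.drop m).take 3).sum = -3 ↔ 3 ≤ pvTrail r (-1)) := by
  match hrev : r.reverse with
  | [] => exfalso; have := congrArg List.length hrev; simp [hlen] at this
  | [c'] => exfalso; have := congrArg List.length hrev; simp [hlen] at this
  | [c', b'] => exfalso; have := congrArg List.length hrev; simp [hlen] at this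
  | c' :: b' :: a' :: rest =>
    have hr : r = rest.reverse ++ [a', b', c'] := by
      have := congrArg List.reverse hrev
      simpa using this
    have hm : rest.length = m := by
      have := congrArg List.length hrev
      simp [hlen] at this; omega
    have hdrop : (r.drop m).take 3 = [a', b', c'] := by
      rw [hr, ← hm, ← List.length_reverse (as := rest), List.drop_left]
      simp
    have ha : a' = -1 ∨ a' = 0 ∨ a' = 1 := he a' (by rw [hr]; simp)
    have hb : b' = -1 ∨ b' = 0 ∨ b' = 1 := he b' (by rw [hr]; simp)
    have hc : c' = -1 ∨ c' = 0 ∨ c' = 1 := he c' (by rw [hr]; simp)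
    rw [hdrop]
    have htr : ∀ v : Int, pvTrail r v =
        if c' = v then (if b' = v then (if a' = v then
          (((rest.takeWhile (fun x => x == v)).length : Int) + 3) else 2) else 1) else 0 := by
      intro v
      simp only [pvTrail, hrev, List.takeWhile_cons]
      by_cases h1 : c' = v <;> by_cases h2 : b' = v <;> by_cases h3 : a' = v <;>
        simp [h1, h2, h3] <;> omega
    constructor <;> rw [htr] <;>
      rcases ha with rfl | rfl | rfl <;> rcases hb with rfl | rfl | rfl <;>
      rcases hc with rfl | rfl | rfl <;> norm_num

theorem pvCore (k : Nat) (sv cv di : Int) (chk : List Int) (x u' d' : Int)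
    (h3 : chk.length = k + 1)
    (h4 : ∀ y ∈ chk, y = -1 ∨ y = 0 ∨ y = 1)
    (hx : x = -1 ∨ x = 0 ∨ x = 1)
    (hu : u' = pvTrail (chk ++ [x]) 1)
    (hd : d' = pvTrail (chk ++ [x]) (-1))
    (hub : u' ≤ (k:Int) + 1) (hdb : d' ≤ (k:Int) + 1)
    (A' : Int × Int × List Int) (B' : Int × Int × Int × Int)
    (hA' : A' = if 2 < (1:Int) + (k:Int) then
        (if (PySem.List.slice (chk ++ [x]) (some ((1:Int)+(k:Int)-2)) (some ((1:Int)+(k:Int)+1))).sum = 3 then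
          (sv + cv * di, 0, chk ++ [x])
        else if (PySem.List.slice (chk ++ [x]) (some ((1:Int)+(k:Int)-2)) (some ((1:Int)+(k:Int)+1))).sum = -3 then
          (PySem.Int.mod sv di, cv + PySem.Int.floordiv sv di, chk ++ [x])
        else (sv, cv, chk ++ [x]))
      else (sv, cv, chk ++ [x]))
    (hB' : B' = if 3 ≤ u' then (sv + cv * di, 0, u', d')
      else if 3 ≤ d' then (PySem.Int.mod sv di, cv + PySem.Int.floordiv sv di, u', d')
      else (sv, cv, u', d')) :
    A'.1 = B'.1 ∧ A'.2.1 = B'.2.1 ∧ A'.2.2.length = k + 1 + 1 ∧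
    (∀ y ∈ A'.2.2, y = -1 ∨ y = 0 ∨ y = 1) ∧
    B'.2.2.1 = pvTrail A'.2.2 1 ∧ B'.2.2.2 = pvTrail A'.2.2 (-1) ∧
    B'.2.2.1 ≤ (k:Int) + 1 ∧ B'.2.2.2 ≤ (k:Int) + 1 := by
  subst hA' hB'
  have helems : ∀ y ∈ chk ++ [x], y = -1 ∨ y = 0 ∨ y = 1 := by
    intro y hy
    rcases List.mem_append.1 hy with h | h
    · exact h4 y h
    · simp at h; subst h; exact hx
  by_cases hk2 : 2 < (1:Int) + (k:Int)
  · have hk : 2 ≤ k := by omega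
    have e1 : (1:Int) + (k:Int) - 2 = ((k-1 : Nat) : Int) := by omega
    have e2 : (1:Int) + (k:Int) + 1 = ((k+2 : Nat) : Int) := by push_cast; ring
    rw [if_pos hk2, e1, e2, PySem.List.slice_natCast,
        show (k+2) - (k-1) = 3 from by omega]
    have hlen' : (chk ++ [x]).length = (k-1) + 3 := by simp [h3]; omega
    obtain ⟨hiff3, hiffm3⟩ := pvLast3 (chk ++ [x]) (k-1) hlen' helems
    by_cases hs3 : (((chk ++ [x]).drop (k-1)).take 3).sum = 3
    · rw [if_pos hs3, if_pos (show 3 ≤ u' from by rw [hu]; exact hiff3.1 hs3)]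
      exact ⟨rfl, rfl, by simp [h3], helems, hu, hd, hub, hdb⟩
    · rw [if_neg hs3, if_neg (show ¬ 3 ≤ u' from fun h => hs3 (hiff3.2 (hu ▸ h)))]
      by_cases hsm3 : (((chk ++ [x]).drop (k-1)).take 3).sum = -3
      · rw [if_pos hsm3, if_pos (show 3 ≤ d' from by rw [hd]; exact hiffm3.1 hsm3)]
        exact ⟨rfl, rfl, by simp [h3], helems, hu, hd, hub, hdb⟩
      · rw [if_neg hsm3, if_neg (show ¬ 3 ≤ d' from fun h => hsm3 (hiffm3.2 (hd ▸ h)))]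
        exact ⟨rfl, rfl, by simp [h3], helems, hu, hd, hub, hdb⟩
  · rw [if_neg hk2,
        if_neg (show ¬ 3 ≤ u' from by omega),
        if_neg (show ¬ 3 ≤ d' from by omega)]
    exact ⟨rfl, rfl, by simp [h3], helems, hu, hd, hub, hdb⟩

theorem pvInvar (d : List Int) (s : Int) (k : Nat) :
    (((PySem.List.pyRange 1 (1 + (k:Int)) 1).foldl (pvStepA d) (s, 0, [(0:Int)])).1 =
       ((PySem.List.pyRange 1 (1 + (k:Int)) 1).foldl (pvStepB d) (s, 0, 0, 0)).1) ∧
    (((PySem.List.pyRange 1 (1 + (k:Int)) 1).foldl (pvStepA d) (s, 0, [(0:Int)])).2.1 =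
       ((PySem.List.pyRange 1 (1 + (k:Int)) 1).foldl (pvStepB d) (s, 0, 0, 0)).2.1) ∧
    (((PySem.List.pyRange 1 (1 + (k:Int)) 1).foldl (pvStepA d) (s, 0, [(0:Int)])).2.2.length = k + 1) ∧
    (∀ x ∈ ((PySem.List.pyRange 1 (1 + (k:Int)) 1).foldl (pvStepA d) (s, 0, [(0:Int)])).2.2,
       x = -1 ∨ x = 0 ∨ x = 1) ∧
    (((PySem.List.pyRange 1 (1 + (k:Int)) 1).foldl (pvStepB d) (s, 0, 0, 0)).2.2.1 =
       pvTrail ((PySem.List.pyRange 1 (1 + (k:Int)) 1).foldl (pvStepA d) (s, 0, [(0:Int)])).2.2 1) ∧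
    (((PySem.List.pyRange 1 (1 + (k:Int)) 1).foldl (pvStepB d) (s, 0, 0, 0)).2.2.2 =
       pvTrail ((PySem.List.pyRange 1 (1 + (k:Int)) 1).foldl (pvStepA d) (s, 0, [(0:Int)])).2.2 (-1)) ∧
    (((PySem.List.pyRange 1 (1 + (k:Int)) 1).foldl (pvStepB d) (s, 0, 0, 0)).2.2.1 ≤ (k:Int)) ∧
    (((PySem.List.pyRange 1 (1 + (k:Int)) 1).foldl (pvStepB d) (s, 0, 0, 0)).2.2.2 ≤ (k:Int)) := by
  induction k with
  | zero =>
    simp [pvTrail]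
  | succ k ih =>
    obtain ⟨ih1, ih2, ih3, ih4, ih5, ih6, ih7, ih8⟩ := ih
    push_cast
    rw [show (1:Int) + ((k:Int)+1) = (1+(k:Int))+1 from by ring,
        PySem.List.pyRange_one_succ_right (by omega : (1:Int) ≤ 1+(k:Int))]
    simp only [List.foldl_append, List.foldl_cons, List.foldl_nil]
    set A := (PySem.List.pyRange 1 (1+(k:Int)) 1).foldl (pvStepA d) (s, 0, [(0:Int)]) with hA
    set B := (PySem.List.pyRange 1 (1+(k:Int)) 1).foldl (pvStepB d) (s, 0, 0, 0) with hB
    simp only [pvStepA, pvStepB, gt_iff_lt]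
    set dp := PySem.List.pyGetD d (1+(k:Int)-1) 0 with hdp
    set di := PySem.List.pyGetD d (1+(k:Int)) 0 with hdi
    rcases lt_trichotomy dp di with hlt | heq | hgt
    · simp only [if_pos hlt, if_neg (show ¬ di < dp from by omega)]
      rw [← ih1, ← ih2]
      refine pvCore k A.1 A.2.1 di A.2.2 1 (B.2.2.1 + 1) 0 ih3 ih4 (Or.inr (Or.inr rfl))
        ?_ ?_ (by omega) (by omega) _ _ rfl rfl
      · rw [ih5, pvTrail_append]; simp
      · rw [pvTrail_append]; norm_num
    · simp only [if_neg (show ¬ dp < di from by omega), if_neg (show ¬ di < dp from by omega)]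
      rw [← ih1, ← ih2]
      refine pvCore k A.1 A.2.1 di A.2.2 0 0 0 ih3 ih4 (Or.inr (Or.inl rfl))
        ?_ ?_ (by omega) (by omega) _ _ rfl rfl
      · rw [pvTrail_append]; norm_num
      · rw [pvTrail_append]; norm_num
    · simp only [if_neg (show ¬ dp < di from by omega), if_pos (show di < dp from hgt)]
      rw [← ih1, ← ih2]
      refine pvCore k A.1 A.2.1 di A.2.2 (-1) 0 (B.2.2.2 + 1) ih3 ih4 (Or.inl rfl)
        ?_ ?_ (by omega) (by omega) _ _ rfl rfl
      · rw [pvTrail_append]; norm_num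
      · rw [ih6, pvTrail_append]; simp

-- ===== VERDICT (by name: the statement is the Claim_ definition above) =====
theorem TIMING_spec : Claim_equal_TIMING := by
  intro s d _ _
  show TIMING s d = TIMING_alt s d
  unfold TIMING TIMING_alt
  rcases Nat.eq_zero_or_pos d.length with h0 | hpos
  · simp [PySem.List.len_eq, h0, PySem.List.pyRange_one_eq_nil (by omega : (0:Int) ≤ 1)]
  · obtain ⟨k, hk⟩ : ∃ k, d.length = k + 1 := ⟨d.length - 1, by omega⟩
    have hcast : (PySem.List.len d) = 1 + (k : Int) := by
      simp [PySem.List.len_eq, hk]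
      ring
    rw [hcast]
    obtain ⟨h1, h2, -⟩ := pvInvar d s k
    simp only [h1, h2]
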